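-- pv_equiv track=rewrite | github.com/kadireren7/Torqa | src/app/kural_parser.py | _split_section_statements
-- ===== SOURCE A (Python) =====
-- from typing import Any, Collection, Dict, List, Optional, Set, Tuple, Union
--
-- def _split_section_statements(
--     tokens: List[Tuple[str, str, int]], start: int
-- ) -> Tuple[List[List[Tuple[str, str, int]]], int]:
--     statements: List[List[Tuple[str, str, int]]] = []
--     current: List[Tuple[str, str, int]] = []
--     i = start
--     while i < len(tokens):
--         k = tokens[i][0]
--         if k == "KEYWORD":
--             break
--         if k == "NL":
--             if current:
--                 statements.append(current)
--                 current = []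
--             i += 1
--             continue
--         current.append(tokens[i])
--         i += 1
--     if current:
--         statements.append(current)
--     return statements, i
-- ===== SOURCE B (Python) =====
-- from itertools import groupby
--
-- def _split_section_statements(tokens, start):
--     n = len(tokens)
--     end = next((i for i in range(start, n) if tokens[i][0] == "KEYWORD"), max(start, n))
--     section = [tokens[i] for i in range(start, end)]
--     statements = [list(run) for is_nl, run in groupby(section, key=lambda t: t[0] == "NL") if not is_nl]
--     return statements, end
-- ===== Notes on version B (the rewrite author's own statement) =====
-- stated objective: simpler
-- what changed: Replaced the stateful while-loop accumulator (current/statements with break and continue) by two declarative passes: first find the KEYWORD boundary index, then group the visited token run with itertools.groupby, keeping only non-NL runs.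
import Mathlib
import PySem

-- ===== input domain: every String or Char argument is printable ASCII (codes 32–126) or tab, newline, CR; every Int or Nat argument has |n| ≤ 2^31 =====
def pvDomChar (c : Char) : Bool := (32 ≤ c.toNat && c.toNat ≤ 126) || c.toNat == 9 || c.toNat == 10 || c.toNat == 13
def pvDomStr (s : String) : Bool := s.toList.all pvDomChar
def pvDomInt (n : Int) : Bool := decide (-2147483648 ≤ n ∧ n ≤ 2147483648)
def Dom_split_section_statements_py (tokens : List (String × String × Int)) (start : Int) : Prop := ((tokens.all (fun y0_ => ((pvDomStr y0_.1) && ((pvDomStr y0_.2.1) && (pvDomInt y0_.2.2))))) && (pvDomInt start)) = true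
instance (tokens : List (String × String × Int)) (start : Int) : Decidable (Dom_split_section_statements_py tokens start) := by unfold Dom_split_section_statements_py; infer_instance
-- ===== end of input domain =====

-- B replaces A's single stateful accumulator loop by a boundary scan followed by a grouping pass (objective: simpler).

-- ===== PORT A =====
-- A's while loop: i walks from start; break on KEYWORD; NL flushes `current`; otherwise append.
-- The trailing `if current: statements.append(current)` is applied at both loop exits.
-- `fuel` only makes the recursion structural; it is started at (len(tokens) - start).toNat,
-- enough for every iteration the Python loop performs.
def pvALoop (tokens : List (String × String × Int)) : Nat → Int →
    List (List (String × String × Int)) → List (String × String × Int) →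
    (List (List (String × String × Int))) × Int
  | 0, i, statements, current =>
    (if current ≠ [] then statements ++ [current] else statements, i)
  | fuel + 1, i, statements, current =>
    if i < (tokens.length : Int) then
      let t := (PySem.List.pyGet? tokens i).getD ("", "", 0)
      if t.1 = "KEYWORD" then
        (if current ≠ [] then statements ++ [current] else statements, i)
      else if t.1 = "NL" then
        pvALoop tokens fuel (i + 1) (if current ≠ [] then statements ++ [current] else statements) []
      else
        pvALoop tokens fuel (i + 1) statements (current ++ [t])
    else
      (if current ≠ [] then statements ++ [current] else statements, i)

def split_section_statements_py (tokens : List (String × String × Int)) (start : Int) : (List (List (String × String × Int))) × Int :=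
  pvALoop tokens ((tokens.length : Int) - start).toNat start [] []

-- ===== PORT B =====
-- groupby(section, key = t[0]=="NL") keeping the key-False runs = split `section` into maximal
-- non-NL runs (NL tokens are separators, empty runs dropped): ported as this structural pass
-- (pvTake = the current run, pvDropGroups = the groups after it).
def pvTake : List (String × String × Int) → List (String × String × Int)
  | [] => []
  | t :: ts => if t.1 = "NL" then [] else t :: pvTake ts

mutual
def pvGroupNonNL : List (String × String × Int) → List (List (String × String × Int))
  | [] => []
  | t :: ts => if t.1 = "NL" then pvGroupNonNL ts else (t :: pvTake ts) :: pvDropGroups ts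
def pvDropGroups : List (String × String × Int) → List (List (String × String × Int))
  | [] => []
  | t :: ts => if t.1 = "NL" then pvGroupNonNL ts else pvDropGroups ts
end

def split_section_statements_py_alt (tokens : List (String × String × Int)) (start : Int) : (List (List (String × String × Int))) × Int :=
  let n : Int := tokens.length
  -- end = next((i for i in range(start, n) if tokens[i][0] == "KEYWORD"), max(start, n))
  let e : Int :=
    match (PySem.List.pyRange start n 1).find? (fun i => ((PySem.List.pyGet? tokens i).getD ("", "", 0)).1 == "KEYWORD") with
    | some i => i
    | none => max start n
  -- section = [tokens[i] for i in range(start, end)]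
  let section_ := (PySem.List.pyRange start e 1).map (fun i => (PySem.List.pyGet? tokens i).getD ("", "", 0))
  (pvGroupNonNL section_, e)

-- ===== PRECONDITION & SPEC =====
-- Pre_ excludes exactly start < -len(tokens), the inputs on which A's tokens[i] raises IndexError
-- (B raises there too); on every input where A returns, Pre_ holds.
def Pre_split_section_statements_py (tokens : List (String × String × Int)) (start : Int) : Prop :=
  -(tokens.length : Int) ≤ start
instance (tokens : List (String × String × Int)) (start : Int) : Decidable (Pre_split_section_statements_py tokens start) := by unfold Pre_split_section_statements_py; infer_instance

def pvWitness_split_section_statements_py : (List (String × String × Int)) × Int :=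
  ([("NAME", "x", 1), ("NL", "", 1), ("NAME", "y", 2)], 0)

def Spec_split_section_statements_py (tokens : List (String × String × Int)) (start : Int) (out : (List (List (String × String × Int))) × Int) : Prop := out = split_section_statements_py_alt tokens start
instance (tokens : List (String × String × Int)) (start : Int) (out : (List (List (String × String × Int))) × Int) : Decidable (Spec_split_section_statements_py tokens start out) := by unfold Spec_split_section_statements_py; infer_instance

-- ===== CLAIM (what is proved, stated in full; the proofs are below) =====
def Claim_equal_split_section_statements_py : Prop := ∀ (tokens : List (String × String × Int)) (start : Int), Dom_split_section_statements_py tokens start → Pre_split_section_statements_py tokens start → Spec_split_section_statements_py tokens start (split_section_statements_py tokens start)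

-- ===== LEMMAS AND PROOFS =====

-- A's accumulator grouping, abstracted from the loop: pvG current seq.
def pvG (cur : List (String × String × Int)) : List (String × String × Int) → List (List (String × String × Int))
  | [] => if cur ≠ [] then [cur] else []
  | t :: ts =>
    if t.1 = "NL" then (if cur ≠ [] then cur :: pvG [] ts else pvG [] ts)
    else pvG (cur ++ [t]) ts

-- B's boundary index, as a function (matches the `e` in the alt port).
def pvBEnd (tokens : List (String × String × Int)) (i : Int) : Int :=
  match (PySem.List.pyRange i (tokens.length : Int) 1).find? (fun j => ((PySem.List.pyGet? tokens j).getD ("", "", 0)).1 == "KEYWORD") with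
  | some j => j
  | none => max i (tokens.length : Int)

def pvSeq (tokens : List (String × String × Int)) (i : Int) : List (String × String × Int) :=
  (PySem.List.pyRange i (pvBEnd tokens i) 1).map (fun j => (PySem.List.pyGet? tokens j).getD ("", "", 0))

theorem pvBEnd_ge (tokens : List (String × String × Int)) (i : Int) : i ≤ pvBEnd tokens i := by
  unfold pvBEnd
  split
  · next j hfind =>
      have hm := List.mem_of_find?_eq_some hfind
      exact ((PySem.List.mem_pyRange_one).1 hm).1
  · exact le_max_left _ _

theorem pvBEnd_stop (tokens : List (String × String × Int)) (i : Int)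
    (hlt : i < (tokens.length : Int))
    (hk : ((PySem.List.pyGet? tokens i).getD ("", "", 0)).1 = "KEYWORD") :
    pvBEnd tokens i = i := by
  unfold pvBEnd
  rw [PySem.List.pyRange_one_cons hlt]
  simp [List.find?, hk]

theorem pvBEnd_step (tokens : List (String × String × Int)) (i : Int)
    (hlt : i < (tokens.length : Int))
    (hk : ((PySem.List.pyGet? tokens i).getD ("", "", 0)).1 ≠ "KEYWORD") :
    pvBEnd tokens i = pvBEnd tokens (i + 1) := by
  unfold pvBEnd
  rw [PySem.List.pyRange_one_cons hlt]
  simp only [List.find?]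
  rw [show (((PySem.List.pyGet? tokens i).getD ("", "", 0)).1 == "KEYWORD") = false by simpa using hk]
  cases (PySem.List.pyRange (i+1) (tokens.length : Int) 1).find? (fun j => ((PySem.List.pyGet? tokens j).getD ("", "", 0)).1 == "KEYWORD") with
  | none => simp; omega
  | some j => rfl

theorem pvSeq_stop (tokens : List (String × String × Int)) (i : Int)
    (h : pvBEnd tokens i = i) : pvSeq tokens i = [] := by
  unfold pvSeq
  rw [h, PySem.List.pyRange_one_eq_nil le_rfl]
  rfl

theorem pvSeq_step (tokens : List (String × String × Int)) (i : Int)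
    (hlt : i < (tokens.length : Int))
    (hk : ((PySem.List.pyGet? tokens i).getD ("", "", 0)).1 ≠ "KEYWORD") :
    pvSeq tokens i = (PySem.List.pyGet? tokens i).getD ("", "", 0) :: pvSeq tokens (i + 1) := by
  unfold pvSeq
  rw [pvBEnd_step tokens i hlt hk]
  have h1 : i < pvBEnd tokens (i+1) := lt_of_lt_of_le (by omega) (pvBEnd_ge tokens (i+1))
  rw [PySem.List.pyRange_one_cons h1]
  rfl

-- With enough fuel, the loop computes statements ++ pvG current (pvSeq …) and stops at pvBEnd.
theorem pvALoop_eq (tokens : List (String × String × Int)) (fuel : Nat) :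
    ∀ (i : Int), (tokens.length : Int) - i ≤ (fuel : Int) →
    ∀ (statements : List (List (String × String × Int))) (cur : List (String × String × Int)),
    pvALoop tokens fuel i statements cur = (statements ++ pvG cur (pvSeq tokens i), pvBEnd tokens i) := by
  induction fuel with
  | zero =>
    intro i hf statements cur
    have hge : (tokens.length : Int) ≤ i := by omega
    have hb : pvBEnd tokens i = i := by
      unfold pvBEnd
      rw [PySem.List.pyRange_one_eq_nil hge]
      simp; omega
    rw [pvALoop, pvSeq_stop tokens i hb, hb]
    simp only [pvG]
    by_cases hc : cur = [] <;> simp [hc]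
  | succ fuel ih =>
    intro i hf statements cur
    rw [pvALoop]
    by_cases h : i < (tokens.length : Int)
    · simp only [h, if_true]
      set t := (PySem.List.pyGet? tokens i).getD ("", "", 0) with ht
      by_cases hk : t.1 = "KEYWORD"
      · have hb := pvBEnd_stop tokens i h hk
        rw [pvSeq_stop tokens i hb, hb]
        simp only [hk, if_true, pvG]
        by_cases hc : cur = [] <;> simp [hc]
      · have hseq := pvSeq_step tokens i h hk
        have hb := pvBEnd_step tokens i h hk
        by_cases hn : t.1 = "NL"
        · simp only [hn, if_true]
          rw [ih (i+1) (by omega), hseq, hb, ← ht]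
          simp only [pvG, hn, if_true]
          by_cases hc : cur = [] <;> simp [hc]
        · simp only [hn, hk, if_false]
          rw [ih (i+1) (by omega), hseq, hb, ← ht]
          simp [pvG, hn]
    · simp only [h, if_false]
      have hge : (tokens.length : Int) ≤ i := by omega
      have hb : pvBEnd tokens i = i := by
        unfold pvBEnd
        rw [PySem.List.pyRange_one_eq_nil hge]
        simp; omega
      rw [pvSeq_stop tokens i hb, hb]
      simp only [pvG]
      by_cases hc : cur = [] <;> simp [hc]

-- A's accumulator grouping coincides with B's run-splitting pass.
theorem pvG_char (s : List (String × String × Int)) :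
    (pvG [] s = pvGroupNonNL s) ∧
    ∀ cur, cur ≠ [] → pvG cur s = (cur ++ pvTake s) :: pvDropGroups s := by
  induction s with
  | nil =>
    constructor
    · simp [pvG, pvGroupNonNL]
    · intro cur hc; simp [pvG, pvTake, pvDropGroups, hc]
  | cons t ts ih =>
    obtain ⟨ih1, ih2⟩ := ih
    by_cases hn : t.1 = "NL"
    · constructor
      · simp [pvG, pvGroupNonNL, hn, ih1]
      · intro cur hc
        simp [pvG, pvTake, pvDropGroups, hn, hc, ih1]
    · constructor
      · rw [pvGroupNonNL]
        simp only [pvG, hn, if_false, List.nil_append]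
        rw [ih2 [t] (by simp)]
        simp
      · intro cur hc
        simp only [pvG, pvTake, pvDropGroups, hn, if_false]
        rw [ih2 (cur ++ [t]) (by simp)]
        simp

-- ===== VERDICT (by name: the statement is the Claim_ definition above) =====
theorem split_section_statements_py_spec : Claim_equal_split_section_statements_py := by
  intro tokens start _ _
  unfold Spec_split_section_statements_py split_section_statements_py split_section_statements_py_alt
  rw [pvALoop_eq tokens _ start (by omega), (pvG_char (pvSeq tokens start)).1]
  rfl
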